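-- pv_equiv track=rewrite | github.com/yxzwang/FamilyTool | pipeline/KG_extraction_post_process_make_intermediate_json.py | filter_longest_lists
-- ===== SOURCE A (Python) =====
-- def filter_longest_lists(nested_list):
--     """
--     判断嵌套列表中的子列表是否长度相同，如果不同，返回最长的子列表
--     :param nested_list: 嵌套列表
--     :return: 如果所有子列表长度相同，返回原嵌套列表；否则返回最长的子列表组成的列表
--     """
--     # 获取所有子列表的长度
--     lengths = [len(sublist) for sublist in nested_list]
--
--     # 检查所有子列表长度是否相同
--     if len(set(lengths)) == 1:
--         return nested_list
--     else:
--         # 找到最长的长度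
--         max_length = max(lengths)
--         # 筛选出最长的子列表
--         longest_lists = [sublist for sublist in nested_list if len(sublist) == max_length]
--         return longest_lists
-- ===== SOURCE B (Python) =====
-- def filter_longest_lists(nested_list):
--     # Group sublists by length in one pass, then select the longest group.
--     grouped = {}
--     for sublist in nested_list:
--         grouped.setdefault(len(sublist), []).append(sublist)
--     if len(grouped) == 1:
--         return nested_list
--     return grouped[max(grouped)]
-- ===== Notes on version B (the rewrite author's own statement) =====
-- stated objective: alternative
-- what changed: Replaces A's three passes (length list, set-of-lengths, re-filter by max) with a single grouping pass into a dict keyed by length, then selects the max-length group.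
-- outside the precondition, e.g. on filter_longest_lists([]): A raises ValueError, B raises ValueError
import Mathlib
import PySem

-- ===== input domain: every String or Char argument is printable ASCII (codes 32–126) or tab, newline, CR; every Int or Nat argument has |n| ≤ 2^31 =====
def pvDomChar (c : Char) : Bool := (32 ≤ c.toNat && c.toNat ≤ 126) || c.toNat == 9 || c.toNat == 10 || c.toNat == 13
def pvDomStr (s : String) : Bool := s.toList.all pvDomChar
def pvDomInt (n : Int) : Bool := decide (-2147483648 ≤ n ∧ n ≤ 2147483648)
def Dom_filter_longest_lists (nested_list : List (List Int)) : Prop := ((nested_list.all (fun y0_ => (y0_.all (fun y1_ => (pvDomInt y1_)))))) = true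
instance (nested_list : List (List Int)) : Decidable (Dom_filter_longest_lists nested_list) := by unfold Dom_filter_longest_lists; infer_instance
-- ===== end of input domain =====

-- B replaces A's set-of-lengths + max + re-filter with one grouping dict keyed by length; equal on nonempty input (A raises ValueError on []).


-- ===== PORT A =====
def filter_longest_lists (nested_list : List (List Int)) : List (List Int) :=
  let lengths : List Int := nested_list.map (fun sublist => (sublist.length : Int))
  if PySem.Set.len (PySem.Set.ofList lengths) = 1 then
    nested_list
  else
    match PySem.List.max? lengths (fun x => x) with
    | some max_length => nested_list.filter (fun sublist => (sublist.length : Int) == max_length)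
    | none => []   -- Python raises ValueError here (max of empty); excluded by Pre_

-- ===== PORT B =====
def filter_longest_lists_alt (nested_list : List (List Int)) : List (List Int) :=
  let grouped : PySem.Dict Int (List (List Int)) :=
    nested_list.foldl (fun d sublist => d.modify ((sublist.length : Int)) [] (· ++ [sublist])) PySem.Dict.empty
  if PySem.Dict.size grouped = 1 then
    nested_list
  else
    match PySem.List.max? (PySem.Dict.keys grouped) (fun x => x) with
    | some m => grouped.getD m []
    | none => []   -- Python raises ValueError here (max of empty dict); excluded by Pre_

-- ===== PRECONDITION & SPEC =====
-- Pre_ excludes only the empty list, on which A raises ValueError (max() of empty sequence).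
def Pre_filter_longest_lists (nested_list : List (List Int)) : Prop := nested_list ≠ []
instance (nested_list : List (List Int)) : Decidable (Pre_filter_longest_lists nested_list) := by unfold Pre_filter_longest_lists; infer_instance
def pvWitness_filter_longest_lists : List (List Int) := [[1], [2, 3]]

def Spec_filter_longest_lists (nested_list : List (List Int)) (out : List (List Int)) : Prop := out = filter_longest_lists_alt nested_list
instance (nested_list : List (List Int)) (out : List (List Int)) : Decidable (Spec_filter_longest_lists nested_list out) := by unfold Spec_filter_longest_lists; infer_instance

-- ===== CLAIM (what is proved, stated in full; the proofs are below) =====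
def Claim_equal_filter_longest_lists : Prop := ∀ (nested_list : List (List Int)), Dom_filter_longest_lists nested_list → Pre_filter_longest_lists nested_list → Spec_filter_longest_lists nested_list (filter_longest_lists nested_list)

-- ===== LEMMAS AND PROOFS =====

-- B's grouping loop, written over the pair list, so the PySem grouping lemmas apply.
theorem grouped_eq_pairs (nested_list : List (List Int)) :
    nested_list.foldl (fun d sublist => d.modify ((sublist.length : Int)) [] (· ++ [sublist])) PySem.Dict.empty
      = (nested_list.map (fun s => ((s.length : Int), s))).foldl
          (fun d p => d.modify p.1 [] (· ++ [p.2])) PySem.Dict.empty := by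
  rw [List.foldl_map]

theorem keys_grouped (nested_list : List (List Int)) :
    (nested_list.foldl (fun d sublist => d.modify ((sublist.length : Int)) [] (· ++ [sublist]))
      (PySem.Dict.empty : PySem.Dict Int (List (List Int)))).keys
      = PySem.Set.ofList (nested_list.map (fun s => (s.length : Int))) := by
  rw [PySem.Dict.keys_foldl_modify_key]
  simp [PySem.Set.update, PySem.Set.ofList_eq_foldl, PySem.Dict.keys_empty]

theorem getD_grouped (nested_list : List (List Int)) (m : Int) :
    (nested_list.foldl (fun d sublist => d.modify ((sublist.length : Int)) [] (· ++ [sublist]))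
      (PySem.Dict.empty : PySem.Dict Int (List (List Int)))).getD m []
      = nested_list.filter (fun s => (s.length : Int) == m) := by
  rw [grouped_eq_pairs, PySem.Dict.getD_foldl_modify_append]
  simp [List.filter_map, Function.comp_def]

-- max over the deduplicated lengths equals max over the lengths (identity key: the extremal value is unique).
theorem max?_ofList_eq (xs : List Int) :
    PySem.List.max? (PySem.Set.ofList xs) (fun x => x) = PySem.List.max? xs (fun x => x) := by
  rcases h1 : PySem.List.max? (PySem.Set.ofList xs) (fun x => x) with _ | m
  · rw [PySem.List.max?_eq_none_iff] at h1
    have hxs : xs = [] := by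
      cases xs with
      | nil => rfl
      | cons a t =>
        exfalso
        have : a ∈ PySem.Set.ofList (a :: t) := by
          rw [PySem.Set.mem_ofList]; exact List.mem_cons_self
        simp [h1] at this
    rw [hxs]; rfl
  · rcases h2 : PySem.List.max? xs (fun x => x) with _ | n
    · rw [PySem.List.max?_eq_none_iff] at h2
      subst h2
      have hm := PySem.List.max?_mem h1
      rw [PySem.Set.mem_ofList] at hm
      simp at hm
    · have hm : m ∈ xs := by
        have := PySem.List.max?_mem h1; rwa [PySem.Set.mem_ofList] at this
      have hn : n ∈ xs := PySem.List.max?_mem h2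
      have h3 : m ≤ n := PySem.List.max?_isMax h2 m hm
      have h4 : n ≤ m := by
        have := PySem.List.max?_isMax h1 n (by rw [PySem.Set.mem_ofList]; exact hn)
        exact this
      exact congrArg some (le_antisymm h3 h4)

-- ===== VERDICT (by name: the statement is the Claim_ definition above) =====
theorem filter_longest_lists_spec : Claim_equal_filter_longest_lists := by
  intro nl _ _
  unfold Spec_filter_longest_lists filter_longest_lists filter_longest_lists_alt
  have hkeys := keys_grouped nl
  have hsz : (nl.foldl (fun d sublist => d.modify ((sublist.length : Int)) [] (· ++ [sublist]))
      (PySem.Dict.empty : PySem.Dict Int (List (List Int)))).size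
      = (PySem.Set.ofList (nl.map (fun s => (s.length : Int)))).length := by
    rw [← hkeys]; simp [PySem.Dict.keys, PySem.Dict.size]
  simp only [hsz, PySem.Set.len, Nat.cast_eq_one]
  split
  · rfl
  · rw [hkeys, max?_ofList_eq]
    rcases h : PySem.List.max? (nl.map (fun s => (s.length : Int))) (fun x => x) with _ | m
    · simp only [h]
    · simp only [h]
      exact (getD_grouped nl m).symm
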